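-- pv_equiv track=rewrite | github.com/JaraVictoria/SSL | todojunto_lexeryparser.py | automata_hasta
-- ===== SOURCE A (Python) =====
-- def automata_hasta(cadena):
-- 	estado = 0
-- 	estados_finales = [5]
--
-- 	for caracter in cadena:
-- 		if estado == 0 and caracter == "h":
-- 			estado = 1
-- 		elif estado == 1 and caracter == "a":
-- 			estado = 2
-- 		elif estado == 2 and caracter == "s":
-- 			estado = 3
-- 		elif estado == 3 and caracter == "t":
-- 			estado = 4
-- 		elif estado == 4 and caracter == "a":
-- 			estado = 5
-- 		else:
-- 			estado = -1
-- 			break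
--
-- 	if estado == -1:
-- 		return ESTADO_TRAMPA
-- 	if estado in estados_finales:
-- 		return ESTADO_FINAL
-- 	else:
-- 		return ESTADO_NO_FINAL
--
-- ESTADO_FINAL = "ESTADO ACEPTADO"
--
-- ESTADO_NO_FINAL = "ESTADO NO ACEPTADO"
--
-- ESTADO_TRAMPA = "ESTADO TRAMPA"
-- ===== SOURCE B (Python) =====
-- ESTADO_FINAL = "ESTADO ACEPTADO"
-- ESTADO_NO_FINAL = "ESTADO NO ACEPTADO"
-- ESTADO_TRAMPA = "ESTADO TRAMPA"
--
-- def automata_hasta(cadena):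
--     target = "hasta"
--     if cadena == target:
--         return ESTADO_FINAL
--     if target.startswith(cadena):
--         return ESTADO_NO_FINAL
--     return ESTADO_TRAMPA
-- ===== Notes on version B (the rewrite author's own statement) =====
-- stated objective: simpler
-- what changed: Replaced the character-by-character DFA state machine (state variable, five-branch ladder, break sentinel) with a direct equality/prefix test against the target word.
import Mathlib
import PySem

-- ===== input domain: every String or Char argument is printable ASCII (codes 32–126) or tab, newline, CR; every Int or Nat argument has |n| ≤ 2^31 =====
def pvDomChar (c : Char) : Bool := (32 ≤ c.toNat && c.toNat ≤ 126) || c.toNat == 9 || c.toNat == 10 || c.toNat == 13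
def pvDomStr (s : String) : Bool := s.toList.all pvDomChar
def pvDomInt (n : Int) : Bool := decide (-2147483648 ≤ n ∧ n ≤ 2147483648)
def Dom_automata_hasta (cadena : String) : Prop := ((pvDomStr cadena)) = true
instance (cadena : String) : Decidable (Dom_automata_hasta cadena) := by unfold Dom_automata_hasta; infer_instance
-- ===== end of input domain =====

-- B replaces the character-by-character DFA state machine with a direct equality/prefix
-- test against the target word (objective: simpler).

-- ===== PORT A =====
-- the for-loop with its 'break': on the else-branch the state is -1 and the loop stops
def pvLoopA_automata_hasta : Int → List Char → Int
  | estado, [] => estado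
  | estado, caracter :: rest =>
    if estado = 0 ∧ caracter = 'h' then pvLoopA_automata_hasta 1 rest
    else if estado = 1 ∧ caracter = 'a' then pvLoopA_automata_hasta 2 rest
    else if estado = 2 ∧ caracter = 's' then pvLoopA_automata_hasta 3 rest
    else if estado = 3 ∧ caracter = 't' then pvLoopA_automata_hasta 4 rest
    else if estado = 4 ∧ caracter = 'a' then pvLoopA_automata_hasta 5 rest
    else -1

def automata_hasta (cadena : String) : String :=
  let estados_finales : List Int := [5]
  let estado := pvLoopA_automata_hasta 0 cadena.toList
  if estado = -1 then "ESTADO TRAMPA"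
  else if estado ∈ estados_finales then "ESTADO ACEPTADO"
  else "ESTADO NO ACEPTADO"

-- ===== PORT B =====
def automata_hasta_alt (cadena : String) : String :=
  if cadena = "hasta" then "ESTADO ACEPTADO"
  else if PySem.Str.startswith "hasta" cadena then "ESTADO NO ACEPTADO"
  else "ESTADO TRAMPA"

-- ===== PRECONDITION & SPEC =====
def Spec_automata_hasta (cadena : String) (out : String) : Prop := out = automata_hasta_alt cadena
instance (cadena : String) (out : String) : Decidable (Spec_automata_hasta cadena out) := by unfold Spec_automata_hasta; infer_instance

-- ===== CLAIM (what is proved, stated in full; the proofs are below) =====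
def Claim_equal_automata_hasta : Prop := ∀ (cadena : String), Dom_automata_hasta cadena → Spec_automata_hasta cadena (automata_hasta cadena)

-- ===== LEMMAS AND PROOFS =====

-- A's loop from state k consumes a prefix of the remaining target: result is k + length
-- if the input is a prefix of (drop k "hasta"), else the trap value -1.
theorem pvLoopA_characterization :
    ∀ (l : List Char) (k : Nat), k ≤ 5 →
      pvLoopA_automata_hasta (k : Int) l =
        if l <+: (['h','a','s','t','a'].drop k) then (k : Int) + l.length else -1 := by
  intro l
  induction l with
  | nil => intro k hk; simp [pvLoopA_automata_hasta]
  | cons c cs ih =>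
    intro k hk
    have h1 := ih 1 (by omega)
    have h2 := ih 2 (by omega)
    have h3 := ih 3 (by omega)
    have h4 := ih 4 (by omega)
    have h5 := ih 5 (by omega)
    push_cast at h1 h2 h3 h4 h5
    interval_cases k <;>
      [ (by_cases hc : c = 'h'); (by_cases hc : c = 'a'); (by_cases hc : c = 's');
        (by_cases hc : c = 't'); (by_cases hc : c = 'a'); skip ] <;>
      simp_all [pvLoopA_automata_hasta, List.cons_prefix_cons] <;>
      split_ifs <;> push_cast <;> ring

-- ===== VERDICT (by name: the statement is the Claim_ definition above) =====
theorem automata_hasta_spec : Claim_equal_automata_hasta := by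
  intro cadena _
  unfold Spec_automata_hasta automata_hasta automata_hasta_alt
  have hchar := pvLoopA_characterization cadena.toList 0 (by omega)
  push_cast at hchar
  simp only [List.drop] at hchar
  simp only []
  rw [hchar]
  have hsw : PySem.Str.startswith "hasta" cadena = true ↔ cadena.toList <+: ['h','a','s','t','a'] := by
    rw [PySem.Str.startswith_eq, PySem.Chars.startswith_iff,
        show ("hasta" : String).toList = ['h','a','s','t','a'] from rfl]
  have heq : cadena = "hasta" ↔ cadena.toList = ['h','a','s','t','a'] := by
    constructor
    · intro h; subst h; rfl
    · intro h; exact String.toList_injective h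
  by_cases hpre : cadena.toList <+: ['h','a','s','t','a']
  · have hlen : cadena.toList.length ≤ 5 := by simpa using hpre.length_le
    by_cases hfull : cadena.toList.length = 5
    · have hfull' : cadena.toList = ['h','a','s','t','a'] :=
        List.IsPrefix.eq_of_length hpre (by simpa using hfull)
      rw [if_pos hpre, if_pos (heq.mpr hfull')]
      simp [hfull']
    · have hne : ¬ cadena = "hasta" := fun h => hfull (by simp [heq.mp h])
      have hlt : cadena.toList.length < 5 := lt_of_le_of_ne hlen hfull
      rw [if_pos hpre, if_neg hne, if_pos (hsw.mpr hpre),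
          if_neg (by omega), if_neg (by intro hmem; rw [List.mem_singleton] at hmem; omega)]
  · have hne : ¬ cadena = "hasta" := fun h => hpre (by simp [heq.mp h])
    have hns : ¬ PySem.Str.startswith "hasta" cadena = true := fun h => hpre (hsw.mp h)
    rw [if_neg hpre, if_neg hne, if_neg hns]
    simp
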